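-- pv_equiv track=rewrite | github.com/manelbenaissa/learning | pendu/fonctions.py | get_missing_letters
-- ===== SOURCE A (Python) =====
-- def get_missing_letters(chosen_word, found_letters):
--     """
--     Replace letters that were not found by * in chosen word.
--
--     - chosen_word : str
--     - found_letters : list of letters
--     """
--     seen_word = ''
--
--     for letter in chosen_word:
--         if letter in found_letters:
--             seen_word += letter
--         else:
--             seen_word += '*'
--     return seen_word
-- ===== SOURCE B (Python) =====
-- def get_missing_letters(chosen_word, found_letters):
--     positions = {}
--     for i, c in enumerate(chosen_word):
--         positions[c] = positions.get(c, []) + [i]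
--     out = ['*'] * len(chosen_word)
--     for letter in found_letters:
--         for i in positions.get(letter, []):
--             out[i] = letter
--     return ''.join(out)
-- ===== Notes on version B (the rewrite author's own statement) =====
-- stated objective: faster
-- what changed: B inverts the computation: it builds a dictionary index from each character to its list of positions in one pass over the word, then starts from a fully masked asterisk array and reveals the indexed positions of each found letter by O(1) lookup, replacing A's per-character scan of found_letters and quadratic string += accumulation.
import Mathlib
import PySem

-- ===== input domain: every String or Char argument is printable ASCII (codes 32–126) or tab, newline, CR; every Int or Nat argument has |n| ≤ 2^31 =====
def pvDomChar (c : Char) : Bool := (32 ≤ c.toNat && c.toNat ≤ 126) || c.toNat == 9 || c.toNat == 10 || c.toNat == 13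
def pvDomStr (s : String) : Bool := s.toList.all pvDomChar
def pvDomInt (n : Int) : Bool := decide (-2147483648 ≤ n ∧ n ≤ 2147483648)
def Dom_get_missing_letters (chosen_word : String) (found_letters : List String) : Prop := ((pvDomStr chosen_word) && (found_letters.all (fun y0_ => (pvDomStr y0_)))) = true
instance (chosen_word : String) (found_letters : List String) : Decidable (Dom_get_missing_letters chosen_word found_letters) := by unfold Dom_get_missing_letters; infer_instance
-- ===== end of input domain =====

-- B builds a character→positions index of the word once, then reveals each found letter's
-- indexed positions in a masked asterisk array (asymptotically faster than A's per-character scan).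

-- ===== PORT A =====
-- for letter in chosen_word: seen_word += letter if letter in found_letters else '*'
def get_missing_letters (chosen_word : String) (found_letters : List String) : String :=
  String.mk (chosen_word.toList.foldl
    (fun seen_word letter =>
      seen_word ++ (if String.mk [letter] ∈ found_letters then [letter] else ['*']))
    [])

-- ===== PORT B =====
-- positions = {};  for i, c in enumerate(chosen_word): positions[c] = positions.get(c, []) + [i]
-- out = ['*'] * len(chosen_word)
-- for letter in found_letters:
--     for i in positions.get(letter, []): out[i] = letter
-- return ''.join(out)
-- (positions[c] = positions.get(c, []) + [i] is Dict.modify; indices from enumerate are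
--  nonnegative Ints, out[i] = letter is List.set at i.toNat, exact here)
def get_missing_letters_alt (chosen_word : String) (found_letters : List String) : String :=
  let positions : PySem.Dict String (List Int) :=
    (PySem.List.enumerate chosen_word.toList 0).foldl
      (fun d p => d.modify (String.mk [p.2]) [] (· ++ [p.1])) PySem.Dict.empty
  let out : List String := found_letters.foldl
    (fun out letter =>
      (positions.getD letter []).foldl (fun out i => out.set i.toNat letter) out)
    (List.replicate chosen_word.toList.length "*")
  PySem.Str.join "" out

-- ===== PRECONDITION & SPEC =====
def Spec_get_missing_letters (chosen_word : String) (found_letters : List String) (out : String) : Prop := out = get_missing_letters_alt chosen_word found_letters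
instance (chosen_word : String) (found_letters : List String) (out : String) : Decidable (Spec_get_missing_letters chosen_word found_letters out) := by unfold Spec_get_missing_letters; infer_instance

-- ===== CLAIM (what is proved, stated in full; the proofs are below) =====
def Claim_equal_get_missing_letters : Prop := ∀ (chosen_word : String) (found_letters : List String), Dom_get_missing_letters chosen_word found_letters → Spec_get_missing_letters chosen_word found_letters (get_missing_letters chosen_word found_letters)

-- ===== LEMMAS AND PROOFS =====

-- A's accumulation loop is append of the pointwise-masked characters.
theorem pv_foldl_mask (found_letters : List String) :
    ∀ (cs acc : List Char),
      cs.foldl (fun seen c => seen ++ (if String.mk [c] ∈ found_letters then [c] else ['*'])) acc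
        = acc ++ cs.map (fun c => if String.mk [c] ∈ found_letters then c else '*') := by
  intro cs
  induction cs with
  | nil => simp
  | cons c cs ih =>
    intro acc
    simp only [List.foldl_cons, List.map_cons, ih]
    by_cases h : String.mk [c] ∈ found_letters <;> simp [h]

-- the index lists exactly the positions of a character (grouping loop ⇒ filter)
theorem pv_positions (cs : List Char) (letter : String) :
    (((PySem.List.enumerate cs 0).foldl
        (fun d p => d.modify (String.mk [p.2]) [] (· ++ [p.1])) PySem.Dict.empty).getD letter [])
      = ((PySem.List.enumerate cs 0).filter (fun p => String.mk [p.2] == letter)).map (·.1) := by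
  have hfold : (PySem.List.enumerate cs 0).foldl
        (fun d p => d.modify (String.mk [p.2]) [] (· ++ [p.1])) PySem.Dict.empty
      = (((PySem.List.enumerate cs 0).map
            (fun p : Int × Char => (String.mk [p.2], p.1))).foldl
          (fun d p => d.modify p.1 [] (· ++ [p.2])) PySem.Dict.empty) := by
    rw [List.foldl_map]
  rw [hfold, PySem.Dict.getD_foldl_modify_append]
  simp [List.filter_map, Function.comp_def]

-- membership in the index, for in-range positions
theorem pv_mem_positions (cs : List Char) (letter : String) (j : Nat) (hj : j < cs.length) :
    ((j : Int) ∈ (((PySem.List.enumerate cs 0).foldl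
        (fun d p => d.modify (String.mk [p.2]) [] (· ++ [p.1])) PySem.Dict.empty).getD letter []))
      ↔ String.mk [cs.getD j ' '] = letter := by
  rw [pv_positions]
  simp only [List.mem_map, List.mem_filter, PySem.List.mem_enumerate_iff]
  constructor
  · rintro ⟨p, ⟨⟨k, hk, rfl⟩, hpl⟩, hfst⟩
    simp only [zero_add] at hfst hpl
    have hkj : k = j := by exact_mod_cast hfst
    subst hkj
    rw [List.getD_eq_getElem cs ' ' hj]
    exact beq_iff_eq.mp (by simpa using hpl)
  · intro h
    refine ⟨((j : Int), cs[j]), ⟨⟨j, hj, by simp⟩, ?_⟩, rfl⟩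
    rw [List.getD_eq_getElem cs ' ' hj] at h
    simpa using beq_iff_eq.mpr h

-- the reveal loop preserves the buffer's length
theorem pv_reveal_len (letter : String) :
    ∀ (lst : List Int) (out : List String),
      (lst.foldl (fun out i => out.set i.toNat letter) out).length = out.length := by
  intro lst
  induction lst with
  | nil => intro out; rfl
  | cons i lst ih => intro out; simp only [List.foldl_cons, ih, List.length_set]

-- pointwise effect of revealing one letter at a list of positions
theorem pv_reveal (letter : String) :
    ∀ (lst : List Int) (out : List String) (j : Nat),
      (lst.foldl (fun out i => out.set i.toNat letter) out).getD j "*"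
        = if j ∈ lst.map Int.toNat ∧ j < out.length then letter else out.getD j "*" := by
  intro lst
  induction lst with
  | nil =>
    intro out j
    rw [List.foldl_nil, if_neg]
    rintro ⟨h, -⟩
    simp at h
  | cons i lst ih =>
    intro out j
    rw [List.foldl_cons, ih]
    simp only [List.length_set, List.map_cons, List.mem_cons]
    by_cases htail : j ∈ lst.map Int.toNat ∧ j < out.length
    · rw [if_pos htail, if_pos ⟨Or.inr htail.1, htail.2⟩]
    · rw [if_neg htail]
      by_cases hij : i.toNat = j
      · subst hij
        by_cases hlen : i.toNat < out.length
        · rw [if_pos ⟨Or.inl rfl, hlen⟩]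
          simp [List.getD_eq_getElem?_getD, hlen]
        · rw [if_neg (by rintro ⟨-, h⟩; exact hlen h),
            List.set_eq_of_length_le (by omega)]
      · have : (out.set i.toNat letter).getD j "*" = out.getD j "*" := by
          simp [List.getD_eq_getElem?_getD, List.getElem?_set_ne hij]
        rw [this, if_neg]
        rintro ⟨h | h, hlen⟩
        · exact hij h.symm
        · exact htail ⟨h, hlen⟩

-- the outer loop over found_letters, pointwise
theorem pv_outer (cs : List Char) :
    ∀ (fl : List String) (out : List String), out.length = cs.length →
      ∀ (j : Nat), j < cs.length →
      (fl.foldl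
          (fun out letter =>
            ((((PySem.List.enumerate cs 0).foldl
                (fun d p => d.modify (String.mk [p.2]) [] (· ++ [p.1]))
                PySem.Dict.empty).getD letter []).foldl
              (fun out i => out.set i.toNat letter) out))
          out).getD j "*"
        = if String.mk [cs.getD j ' '] ∈ fl then String.mk [cs.getD j ' '] else out.getD j "*" := by
  intro fl
  induction fl with
  | nil => intro out _ j _; simp
  | cons letter fl ih =>
    intro out hlen j hj
    simp only [List.foldl_cons]
    rw [ih _ (by rw [pv_reveal_len]; exact hlen) j hj, pv_reveal]
    by_cases hmem : String.mk [cs.getD j ' '] ∈ fl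
    · rw [if_pos hmem, if_pos (List.mem_cons_of_mem _ hmem)]
    · rw [if_neg hmem]
      by_cases heq : String.mk [cs.getD j ' '] = letter
      · have hjm : j ∈ ((((PySem.List.enumerate cs 0).foldl
            (fun d p => d.modify (String.mk [p.2]) [] (· ++ [p.1]))
            PySem.Dict.empty).getD letter []).map Int.toNat) := by
          refine List.mem_map.mpr ⟨(j : Int), ?_, by simp⟩
          exact (pv_mem_positions cs letter j hj).mpr heq
        rw [if_pos ⟨hjm, by omega⟩, if_pos (by rw [heq]; exact List.mem_cons_self ..), heq]
      · have hjm : ¬ j ∈ ((((PySem.List.enumerate cs 0).foldl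
            (fun d p => d.modify (String.mk [p.2]) [] (· ++ [p.1]))
            PySem.Dict.empty).getD letter []).map Int.toNat) := by
          intro h
          rcases List.mem_map.mp h with ⟨i, hi, hij⟩
          have hnn : 0 ≤ i := by
            rw [pv_positions] at hi
            rcases List.mem_map.mp hi with ⟨p, hp, rfl⟩
            rcases (PySem.List.mem_enumerate_iff _ _ _).mp (List.mem_filter.mp hp).1
              with ⟨k, hk, rfl⟩
            simp
          have : i = (j : Int) := by omega
          subst this
          exact heq ((pv_mem_positions cs letter j hj).mp hi)
        rw [if_neg (fun h => hjm h.1),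
          if_neg (fun h => (List.mem_cons.mp h).elim heq hmem)]

-- ===== VERDICT (by name: the statement is the Claim_ definition above) =====
theorem get_missing_letters_spec : Claim_equal_get_missing_letters := by
  unfold Claim_equal_get_missing_letters
  intro chosen_word found_letters _
  unfold Spec_get_missing_letters get_missing_letters get_missing_letters_alt
  rw [pv_foldl_mask]
  simp only [List.nil_append]
  set cs := chosen_word.toList with hcs
  set fl := found_letters
  have hout : (fl.foldl
      (fun out letter =>
        ((((PySem.List.enumerate cs 0).foldl
            (fun d p => d.modify (String.mk [p.2]) [] (· ++ [p.1]))
            PySem.Dict.empty).getD letter []).foldl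
          (fun out i => out.set i.toNat letter) out))
      (List.replicate cs.length "*"))
      = cs.map (fun c => if String.mk [c] ∈ fl then String.mk [c] else "*") := by
    have hlen1 : ∀ (fl' : List String) (out : List String),
        (fl'.foldl
          (fun out letter =>
            ((((PySem.List.enumerate cs 0).foldl
                (fun d p => d.modify (String.mk [p.2]) [] (· ++ [p.1]))
                PySem.Dict.empty).getD letter []).foldl
              (fun out i => out.set i.toNat letter) out))
          out).length = out.length := by
      intro fl'
      induction fl' with
      | nil => intro out; rfl
      | cons letter fl' ih => intro out; simp only [List.foldl_cons, ih, pv_reveal_len]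
    apply List.ext_getElem
    · rw [hlen1]; simp
    · intro i h1 h2
      have hi : i < cs.length := by
        have := hlen1 fl (List.replicate cs.length "*")
        simp only [List.length_replicate] at this
        omega
      have hgd := pv_outer cs fl (List.replicate cs.length "*") (by simp) i hi
      rw [← List.getD_eq_getElem _ "*" h1, ← List.getD_eq_getElem _ "*" h2] at *
      rw [hgd, List.getD_eq_getElem cs ' ' hi]
      by_cases hm : String.mk [cs[i]] ∈ fl
      · simp [hm, List.getD_eq_getElem?_getD, hi]
      · simp [hm, List.getD_eq_getElem?_getD, hi]
  rw [hout]
  apply String.toList_injective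
  rw [PySem.Str.toList_join]
  simp only [List.map_map]
  have : (cs.map (fun c => (if String.mk [c] ∈ fl then String.mk [c] else "*").toList))
      = (cs.map (fun c => if String.mk [c] ∈ fl then c else '*')).map (fun c => [c]) := by
    simp only [List.map_map]
    apply List.map_congr_left
    intro c _
    by_cases h : String.mk [c] ∈ fl
    · rw [if_pos h]
      simp only [Function.comp_apply, if_pos h]
      exact String.toList_ofList
    · rw [if_neg h]
      simp only [Function.comp_apply, if_neg h]
      decide
  rw [Function.comp_def] at *
  have hempty : ("" : String).toList = ([] : List Char) := rfl
  rw [this, hempty, PySem.Chars.join_nil_singletons]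
  exact String.toList_ofList
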